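-- pv_equiv track=rewrite | github.com/kaydurgu/problem_solving | 1332-remove-palindromic-subsequences/1332-remove-palindromic-subsequences.py | removePalindromeSub
-- ===== SOURCE A (Python) =====
-- def removePalindromeSub(s: str) -> int:
--     left = 0
--     right = len(s) - 1
--     if len(s) == 0:
--         return 0
--     while left<=right:
--         if s[left] == s[right]:
--             left+=1
--             right-=1
--         else:
--             return 2
--     return 1
-- ===== SOURCE B (Python) =====
-- def removePalindromeSub(s: str) -> int:
--     if len(s) == 0:
--         return 0
--     return 1 if s == s[::-1] else 2
-- ===== Notes on version B (the rewrite author's own statement) =====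
-- stated objective: simpler
-- what changed: Replaces the convergent two-pointer loop with an early exit by a single whole-string reversal comparison (s == s[::-1]) plus the empty-string guard.
import Mathlib
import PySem

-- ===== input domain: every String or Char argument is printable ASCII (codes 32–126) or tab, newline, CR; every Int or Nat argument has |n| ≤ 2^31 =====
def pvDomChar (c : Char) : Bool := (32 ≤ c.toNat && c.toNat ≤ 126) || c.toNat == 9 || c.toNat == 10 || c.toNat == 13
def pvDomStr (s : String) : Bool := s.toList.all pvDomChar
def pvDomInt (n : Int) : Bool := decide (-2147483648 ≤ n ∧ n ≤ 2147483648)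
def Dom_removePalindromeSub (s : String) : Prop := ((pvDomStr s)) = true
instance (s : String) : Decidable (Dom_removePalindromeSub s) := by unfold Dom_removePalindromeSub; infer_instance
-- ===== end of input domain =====

-- B replaces A's convergent two-pointer scan with a whole-string reversal comparison (simpler); same O(n) cost.

-- ===== PORT A =====
-- the 'while left<=right' loop of A
def removePalindromeSubLoop (s : String) (left right : Int) : Int :=
  if left ≤ right then
    if PySem.Str.pyGet? s left = PySem.Str.pyGet? s right then
      removePalindromeSubLoop s (left + 1) (right - 1)
    else 2
  else 1
termination_by (right - left + 1).toNat
decreasing_by omega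

def removePalindromeSub (s : String) : Int :=
  let left : Int := 0
  let right : Int := (PySem.Str.len s : Int) - 1
  if PySem.Str.len s = 0 then 0
  else removePalindromeSubLoop s left right

-- ===== PORT B =====
def removePalindromeSub_alt (s : String) : Int :=
  if PySem.Str.len s = 0 then 0
  else
    match PySem.Str.slice? s none none (-1) with   -- s[::-1]
    | some r => if s = r then 1 else 2
    | none   => 2                                   -- unreachable (step ≠ 0)

-- ===== PRECONDITION & SPEC =====
def Spec_removePalindromeSub (s : String) (out : Int) : Prop := out = removePalindromeSub_alt s
instance (s : String) (out : Int) : Decidable (Spec_removePalindromeSub s out) := by unfold Spec_removePalindromeSub; infer_instance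

-- ===== CLAIM (what is proved, stated in full; the proofs are below) =====
def Claim_equal_removePalindromeSub : Prop := ∀ (s : String), Dom_removePalindromeSub s → Spec_removePalindromeSub s (removePalindromeSub s)

-- ===== LEMMAS AND PROOFS =====

-- The loop returns 1 exactly when every remaining index pair matches; invariant l + r = len - 1.
theorem removePalindromeSubLoop_eq_one_iff (s : String) (m : Nat) (l r : Int) (hl : 0 ≤ l)
    (hlr : l + r = (s.toList.length : Int) - 1) (hm : (r - l + 1).toNat ≤ m) :
    removePalindromeSubLoop s l r = 1 ↔
      (∀ i : Nat, l ≤ (i : Int) → (i : Int) ≤ r →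
        s.toList[i]? = s.toList[s.toList.length - 1 - i]?) := by
  induction m generalizing l r with
  | zero =>
    have h : ¬ l ≤ r := by omega
    rw [removePalindromeSubLoop, if_neg h]
    constructor
    · intro _ i hi1 hi2; exfalso; omega
    · intro _; trivial
  | succ m ih =>
    by_cases h : l ≤ r
    · rw [removePalindromeSubLoop, if_pos h]
      by_cases hc : PySem.Str.pyGet? s l = PySem.Str.pyGet? s r
      · rw [if_pos hc]
        have hr0 : 0 ≤ r := by omega
        have hlcast : l = ((l.toNat : Nat) : Int) := by omega
        have hrcast : r = ((r.toNat : Nat) : Int) := by omega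
        have hcc : s.toList[l.toNat]? = s.toList[r.toNat]? := by
          have hc' := hc
          rw [hlcast, hrcast, PySem.Str.pyGet?_natCast, PySem.Str.pyGet?_natCast] at hc'
          exact hc'
        have hrl : s.toList.length - 1 - l.toNat = r.toNat := by omega
        have hlr2 : s.toList.length - 1 - r.toNat = l.toNat := by omega
        rw [ih (l + 1) (r - 1) (by omega) (by omega) (by omega)]
        constructor
        · intro hall i hi1 hi2
          by_cases h1 : (i : Int) = l
          · have : i = l.toNat := by omega
            subst this; rw [hrl]; exact hcc
          · by_cases h2 : (i : Int) = r
            · have : i = r.toNat := by omega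
              subst this; rw [hlr2]; exact hcc.symm
            · exact hall i (by omega) (by omega)
        · intro hall i hi1 hi2
          exact hall i (by omega) (by omega)
      · rw [if_neg hc]
        constructor
        · intro hcon; exact absurd hcon (by norm_num)
        · intro hall
          exfalso
          apply hc
          have h1 := hall l.toNat (by omega) (by omega)
          have hrl : s.toList.length - 1 - l.toNat = r.toNat := by omega
          rw [hrl] at h1
          have hlcast : l = ((l.toNat : Nat) : Int) := by omega
          have hrcast : r = ((r.toNat : Nat) : Int) := by omega
          rw [hlcast, hrcast, PySem.Str.pyGet?_natCast, PySem.Str.pyGet?_natCast]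
          exact h1
    · rw [removePalindromeSubLoop, if_neg h]
      constructor
      · intro _ i hi1 hi2; exfalso; omega
      · intro _; trivial

theorem removePalindromeSubLoop_one_or_two (s : String) (m : Nat) (l r : Int)
    (hm : (r - l + 1).toNat ≤ m) :
    removePalindromeSubLoop s l r = 1 ∨ removePalindromeSubLoop s l r = 2 := by
  induction m generalizing l r with
  | zero =>
    have h : ¬ l ≤ r := by omega
    rw [removePalindromeSubLoop, if_neg h]
    left; rfl
  | succ m ih =>
    by_cases h : l ≤ r
    · rw [removePalindromeSubLoop, if_pos h]
      by_cases hc : PySem.Str.pyGet? s l = PySem.Str.pyGet? s r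
      · rw [if_pos hc]; exact ih (l + 1) (r - 1) (by omega)
      · rw [if_neg hc]; right; rfl
    · rw [removePalindromeSubLoop, if_neg h]
      left; rfl

-- palindrome characterisation matching the loop's condition at l = 0, r = n - 1
theorem palindrome_iff_pairs (cs : List Char) :
    cs = cs.reverse ↔
      (∀ i : Nat, (0 : Int) ≤ (i : Int) → (i : Int) ≤ (cs.length : Int) - 1 →
        cs[i]? = cs[cs.length - 1 - i]?) := by
  constructor
  · intro hpal i _ hi2
    have hilt : i < cs.length := by omega
    have hrev := List.getElem?_reverse hilt
    rw [← hpal] at hrev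
    exact hrev
  · intro h
    apply List.ext_getElem?
    intro i
    by_cases hilt : i < cs.length
    · have h1 := h i (by omega) (by omega)
      have h2 := List.getElem?_reverse hilt
      rw [h1, h2]
    · rw [List.getElem?_eq_none (by omega), List.getElem?_eq_none (by simp; omega)]

-- ===== VERDICT (by name: the statement is the Claim_ definition above) =====
theorem removePalindromeSub_spec : Claim_equal_removePalindromeSub := by
  intro s _
  unfold Spec_removePalindromeSub removePalindromeSub removePalindromeSub_alt
  by_cases hz : PySem.Str.len s = 0
  · rw [if_pos hz, if_pos hz]
  · rw [if_neg hz, if_neg hz, PySem.Str.slice?_none_none_neg_one]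
    have hmatch : (match some (String.ofList s.toList.reverse) with
        | some r => if s = r then (1 : Int) else 2
        | none => 2) = if s = String.ofList s.toList.reverse then (1 : Int) else 2 := rfl
    rw [hmatch]
    have hlen : PySem.Str.len s = s.toList.length := by simp
    have hpal : (s = String.ofList s.toList.reverse) ↔ s.toList = s.toList.reverse := by
      constructor
      · intro h; conv_lhs => rw [h]
        simp
      · intro h; conv_lhs => rw [← (String.ofList_toList (s := s))]
        rw [← h]
    have hiff := removePalindromeSubLoop_eq_one_iff s (((PySem.Str.len s : Int) - 1 + 1).toNat)
      0 ((PySem.Str.len s : Int) - 1) (by omega) (by rw [hlen]; omega) (by omega)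
    by_cases hp : s.toList = s.toList.reverse
    · have h1 : removePalindromeSubLoop s 0 ((PySem.Str.len s : Int) - 1) = 1 := by
        rw [hiff]
        intro i hi1 hi2
        rw [hlen] at hi2
        exact (palindrome_iff_pairs s.toList).mp hp i hi1 hi2
      rw [h1, if_pos (hpal.mpr hp)]
    · have h1 : removePalindromeSubLoop s 0 ((PySem.Str.len s : Int) - 1) ≠ 1 := by
        rw [Ne, hiff]
        intro hcon
        apply hp
        apply (palindrome_iff_pairs s.toList).mpr
        intro i hi1 hi2
        apply hcon i hi1
        rw [hlen]; omega
      rcases removePalindromeSubLoop_one_or_two s (((PySem.Str.len s : Int) - 1 + 1).toNat)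
        0 ((PySem.Str.len s : Int) - 1) (by omega) with h | h
      · exact absurd h h1
      · rw [h, if_neg (fun hc => hp (hpal.mp hc))]
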